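-- pv_equiv track=rewrite | github.com/AIIne1994/leetcode_practice | 20210103/can_form_array.py | canFormArray
-- ===== SOURCE A (Python) =====
-- def canFormArray(arr, pieces):
--     def connected_in_arr(arr_part, piece):
--         if piece[0] in arr_part:
--             head = arr_part.index(piece[0])
--             for i, num in enumerate(piece):
--                 if (i+head) >= len(arr_part):
--                     return False
--                 if arr_part[i + head] != num:
--                     return False
--             return True
--         else:
--             return False
--
--
--     for piece in pieces:
--         if connected_in_arr(arr, piece):
--             for num in piece:
--                 arr.remove(num)
--
--     return arr == []
-- ===== SOURCE B (Python) =====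
-- # Return-value equivalent to A (A mutates arr in place; B does not): per piece,
-- # the element-by-element match loop and the repeated list.remove calls are
-- # replaced by one slice comparison and a single counting-dict filter pass.
-- def canFormArray(arr, pieces):
--     xs = list(arr)
--     for piece in pieces:
--         try:
--             h = xs.index(piece[0])
--         except ValueError:
--             continue
--         if xs[h:h + len(piece)] == piece:
--             need = {}
--             for v in piece:
--                 need[v] = need.get(v, 0) + 1
--             out = []
--             for x in xs:
--                 c = need.get(x, 0)
--                 if c > 0:
--                     need[x] = c - 1
--                 else:
--                     out.append(x)
--             xs = out
--     return not xs
-- ===== Notes on version B (the rewrite author's own statement) =====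
-- stated objective: alternative
-- what changed: Per piece, A's indexed element-by-element match loop and removal via one list.remove call (each a fresh scan) per element are replaced by a single slice comparison plus one counting-dict pass that filters the matched multiset out of the list in one sweep; B works on a copy instead of mutating arr (return-value equivalence).
-- outside the precondition, e.g. on canFormArray([1, 2, 3], [[], [1, 2, 3]]): A raises IndexError, B raises IndexError
import Mathlib
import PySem

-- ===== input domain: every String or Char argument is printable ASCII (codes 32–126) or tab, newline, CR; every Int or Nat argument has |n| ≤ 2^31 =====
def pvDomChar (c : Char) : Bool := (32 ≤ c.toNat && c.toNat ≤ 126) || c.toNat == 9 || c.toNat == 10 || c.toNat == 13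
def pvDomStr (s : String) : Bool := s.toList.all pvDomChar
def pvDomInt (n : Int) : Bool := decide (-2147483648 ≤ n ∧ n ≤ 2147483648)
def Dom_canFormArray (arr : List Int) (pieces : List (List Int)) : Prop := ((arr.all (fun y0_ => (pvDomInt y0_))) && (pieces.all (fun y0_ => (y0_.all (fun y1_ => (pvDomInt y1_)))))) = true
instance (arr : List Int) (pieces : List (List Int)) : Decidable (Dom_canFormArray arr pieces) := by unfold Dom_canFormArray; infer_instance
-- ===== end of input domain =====

-- B changes only the return-value computation; Python A also mutates arr in place, which B does not.

-- ===== PORT A =====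
-- the inner 'for i, num in enumerate(piece)' loop of connected_in_arr
def connLoopA (xs : List Int) (head : Nat) : Nat → List Int → Bool
  | _, [] => true
  | i, num :: rest =>
    if xs.length ≤ i + head then false
    else if ¬ (PySem.List.pyGetD xs ((i + head : Nat) : Int) 0 = num) then false
    else connLoopA xs head (i + 1) rest

def connectedInArr (xs : List Int) (piece : List Int) : Bool :=
  match piece with
  | [] => false   -- Python raises IndexError on piece[0]; excluded by Pre_
  | p0 :: _ =>
    if xs.contains p0 then
      connLoopA xs ((PySem.List.index? xs p0).getD 0) 0 piece
    else false

def canFormArray (arr : List Int) (pieces : List (List Int)) : Bool :=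
  decide ((pieces.foldl (fun a piece =>
    if connectedInArr a piece then
      -- 'for num in piece: arr.remove(num)' (never raises when the match succeeded)
      piece.foldl (fun ys num => (PySem.List.remove? ys num).getD ys) a
    else a) arr) = [])

-- ===== PORT B =====
def bStep (xs : List Int) (piece : List Int) : List Int :=
  match piece with
  | [] => xs   -- Python raises IndexError on piece[0]; excluded by Pre_
  | p0 :: _ =>
    match PySem.List.index? xs p0 with
    | none => xs
    | some h =>
      if PySem.List.slice xs (some (h : Int)) (some ((h : Int) + (piece.length : Int))) = piece then
        let need : PySem.Dict Int Int :=
          piece.foldl (fun d v => d.insert v (d.getD v 0 + 1)) PySem.Dict.empty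
        (xs.foldl (fun (acc : List Int × PySem.Dict Int Int) x =>
          let c := acc.2.getD x 0
          if 0 < c then (acc.1, acc.2.insert x (c - 1)) else (acc.1 ++ [x], acc.2))
          ([], need)).1
      else xs

def canFormArray_alt (arr : List Int) (pieces : List (List Int)) : Bool :=
  decide ((pieces.foldl bStep arr) = [])

-- ===== PRECONDITION & SPEC =====
-- Pre_ excludes only inputs with an empty piece, on which Python A raises IndexError at piece[0].
def Pre_canFormArray (arr : List Int) (pieces : List (List Int)) : Prop := ∀ p ∈ pieces, p ≠ []
instance (arr : List Int) (pieces : List (List Int)) : Decidable (Pre_canFormArray arr pieces) := by unfold Pre_canFormArray; infer_instance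
def pvWitness_canFormArray : List Int × List (List Int) := ([1, 2, 3], [[1, 2], [3]])

def Spec_canFormArray (arr : List Int) (pieces : List (List Int)) (out : Bool) : Prop := out = canFormArray_alt arr pieces
instance (arr : List Int) (pieces : List (List Int)) (out : Bool) : Decidable (Spec_canFormArray arr pieces out) := by unfold Spec_canFormArray; infer_instance

-- ===== CLAIM =====
def Claim_equal_canFormArray : Prop := ∀ (arr : List Int) (pieces : List (List Int)), Dom_canFormArray arr pieces → Pre_canFormArray arr pieces → Spec_canFormArray arr pieces (canFormArray arr pieces)

-- ===== LEMMAS AND PROOFS =====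

-- proof-side functional version of B's counting filter pass
def cntF : List Int → (Int → Int) → List Int
  | [], _ => []
  | x :: xs, f =>
    if 0 < f x then cntF xs (fun y => if y = x then f x - 1 else f y)
    else x :: cntF xs f

-- A's total remove-first step
def rmv (ys : List Int) (num : Int) : List Int := (PySem.List.remove? ys num).getD ys

theorem rmv_nil (v : Int) : rmv [] v = [] := rfl

theorem rmv_cons (x : Int) (xs : List Int) (v : Int) :
    rmv (x :: xs) v = if x = v then xs else x :: rmv xs v := by
  by_cases h : x = v
  · subst h; simp [rmv]
  · rw [if_neg h]
    unfold rmv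
    rw [PySem.List.remove?_cons_of_ne xs h]
    cases PySem.List.remove? xs v <;> simp

theorem cntF_cons (x : Int) (xs : List Int) (f : Int → Int) :
    cntF (x :: xs) f =
      if 0 < f x then cntF xs (fun y => if y = x then f x - 1 else f y)
      else x :: cntF xs f := rfl

theorem cntF_congr (xs : List Int) (f g : Int → Int) (h : ∀ y, f y = g y) :
    cntF xs f = cntF xs g := by
  have : f = g := funext h
  rw [this]

theorem cntF_zero (xs : List Int) (f : Int → Int) (h : ∀ y, f y = 0) :
    cntF xs f = xs := by
  induction xs with
  | nil => rfl
  | cons x xs ih => simp [cntF, h x, ih]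

-- key step: bumping v's count by one equals removing the first v beforehand
theorem cntF_bump (xs : List Int) (f : Int → Int) (v : Int) (hf : ∀ y, 0 ≤ f y) :
    cntF xs (fun y => if y = v then f y + 1 else f y) = cntF (rmv xs v) f := by
  induction xs generalizing f with
  | nil => simp [cntF, rmv_nil]
  | cons x xs ih =>
    rw [rmv_cons, cntF_cons]
    by_cases hxv : x = v
    · subst hxv
      have e1 : (if x = x then f x + 1 else f x) = f x + 1 := if_pos rfl
      rw [e1, if_pos (by have := hf x; omega), if_pos rfl]
      apply cntF_congr
      intro y
      by_cases hy : y = x <;> simp [hy]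
    · have e1 : (if x = v then f x + 1 else f x) = f x := if_neg hxv
      rw [e1, if_neg hxv, cntF_cons]
      by_cases hfx : 0 < f x
      · rw [if_pos hfx, if_pos hfx]
        have e2 : (fun y => if y = x then f x - 1 else if y = v then f y + 1 else f y)
            = (fun y => if y = v then (fun z => if z = x then f x - 1 else f z) y + 1
                        else (fun z => if z = x then f x - 1 else f z) y) := by
          funext y
          by_cases hyx : y = x
          · subst hyx; simp [hxv]
          · by_cases hyv : y = v <;> simp [hyx, hyv, Ne.symm hxv]
        rw [e2, ih (fun z => if z = x then f x - 1 else f z)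
              (by intro y; by_cases hy : y = x <;> simp [hy] <;> [omega; exact hf y])]
      · rw [if_neg hfx, if_neg hfx, ih f hf]

-- A's sequential removal equals the counting filter
theorem foldl_rmv_eq_cntF (p xs : List Int) :
    p.foldl rmv xs = cntF xs (fun v => (p.count v : Int)) := by
  induction p generalizing xs with
  | nil =>
    simp only [List.foldl_nil]
    rw [cntF_zero] <;> simp
  | cons v p ih =>
    simp only [List.foldl_cons]
    rw [ih (rmv xs v), ← cntF_bump xs _ v (by intro y; positivity)]
    apply cntF_congr
    intro y
    by_cases hy : y = v
    · subst hy; simp [List.count_cons]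
    · simp [List.count_cons, hy, Ne.symm hy]

-- the inner check loop of A is the slice test
theorem connLoopA_eq (p : List Int) (xs : List Int) (h i : Nat) :
    connLoopA xs h i p = decide ((xs.drop (h + i)).take p.length = p) := by
  induction p generalizing i with
  | nil => simp [connLoopA]
  | cons num rest ih =>
    by_cases hlen : xs.length ≤ i + h
    · have hdrop : xs.drop (h + i) = [] := List.drop_eq_nil_of_le (by omega)
      simp [connLoopA, hlen, hdrop]
    · have hih : h + i < xs.length := by omega
      have hdrop : xs.drop (h + i) = xs[h + i] :: xs.drop (h + i + 1) :=
        (List.getElem_cons_drop hih).symm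
      have hget : PySem.List.pyGetD xs ((i : Int) + (h : Int)) 0 = xs[h + i] := by
        have hc : ((i : Int) + (h : Int)) = ((i + h : Nat) : Int) := by push_cast; ring
        rw [hc, PySem.List.pyGetD_natCast]
        simp [List.getD_eq_getElem?_getD, List.getElem?_eq_getElem (by omega : i + h < xs.length)]
        congr 1; omega
      by_cases hnum : xs[h + i] = num
      · simp only [connLoopA, if_neg (by omega : ¬ xs.length ≤ i + h)]
        rw [if_neg (by simp [hget, hnum])]
        rw [ih (i + 1)]
        have hsh : h + (i + 1) = h + i + 1 := by omega
        rw [hsh, hdrop]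
        simp only [List.length_cons, List.take_succ_cons]
        simp [hnum]
      · simp only [connLoopA, if_neg (by omega : ¬ xs.length ≤ i + h)]
        rw [if_pos (by simp [hget, hnum])]
        rw [hdrop]
        simp only [List.length_cons, List.take_succ_cons]
        simp [hnum]

-- B's dict pass computes the functional counting filter
theorem foldl_pass_eq_cntF (xs : List Int) (d : PySem.Dict Int Int) (acc : List Int) :
    (xs.foldl (fun (acc : List Int × PySem.Dict Int Int) x =>
      let c := acc.2.getD x 0
      if 0 < c then (acc.1, acc.2.insert x (c - 1)) else (acc.1 ++ [x], acc.2))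
      (acc, d)).1 = acc ++ cntF xs (fun v => d.getD v 0) := by
  induction xs generalizing d acc with
  | nil => simp [cntF]
  | cons x xs ih =>
    simp only [List.foldl_cons, cntF_cons]
    by_cases hc : 0 < d.getD x 0
    · simp only [if_pos hc]
      rw [ih]
      congr 1
      apply cntF_congr
      intro y
      simp [PySem.Dict.getD_insert]
    · simp only [if_neg hc]
      rw [ih]
      simp

-- count dictionary lookup
theorem need_getD (p : List Int) (y : Int) :
    (p.foldl (fun d v => d.insert v (d.getD v 0 + 1)) (PySem.Dict.empty : PySem.Dict Int Int)).getD y 0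
      = (p.count y : Int) := by
  rw [PySem.Dict.getD_foldl_insert_add_one]
  simp [PySem.Dict.getD_empty]

-- the two per-piece steps agree
theorem step_eq (xs piece : List Int) :
    (if connectedInArr xs piece then piece.foldl rmv xs else xs) = bStep xs piece := by
  match piece with
  | [] => simp [connectedInArr, bStep]
  | p0 :: rest =>
    by_cases hmem : p0 ∈ xs
    · obtain ⟨h, hh⟩ : ∃ h, PySem.List.index? xs p0 = some h := by
        have := (PySem.List.index?_isSome_iff (xs := xs) (v := p0)).2 hmem
        exact Option.isSome_iff_exists.1 this
      have hcontains : xs.contains p0 = true := by simp [hmem]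
      have hslice : PySem.List.slice xs (some (h : Int)) (some ((h : Int) + ((p0 :: rest).length : Int)))
          = (xs.drop h).take (p0 :: rest).length := by
        exact PySem.List.slice_natCast_add xs h (p0 :: rest).length
      simp only [connectedInArr, bStep, hcontains, if_pos, hh, Option.getD_some, List.length_cons]
      rw [connLoopA_eq]
      simp only [Nat.add_zero, List.length_cons] at hslice ⊢
      rw [hslice]
      by_cases heq : (xs.drop h).take (rest.length + 1) = p0 :: rest
      · rw [if_pos (by simp [heq]), if_pos heq]
        rw [foldl_rmv_eq_cntF, foldl_pass_eq_cntF]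
        simp only [List.nil_append]
        apply cntF_congr
        intro y
        rw [need_getD]
      · rw [if_neg (by simp [heq]), if_neg heq]
    · have hcontains : xs.contains p0 = false := by simp [hmem]
      have hidx : PySem.List.index? xs p0 = none :=
        (PySem.List.index?_eq_none_iff xs p0).2 hmem
      simp only [connectedInArr, bStep, hidx, hcontains]
      simp

-- ===== VERDICT =====
theorem canFormArray_spec : Claim_equal_canFormArray := by
  intro arr pieces _ _
  unfold Spec_canFormArray canFormArray canFormArray_alt
  have hfun : (fun (a : List Int) (piece : List Int) =>
      if connectedInArr a piece then
        piece.foldl (fun ys num => (PySem.List.remove? ys num).getD ys) a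
      else a) = bStep := by
    funext a piece
    rw [← step_eq a piece]
    rfl
  rw [hfun]
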